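-- pv_equiv track=rewrite | github.com/xedha/ProjetS4 | django_project/link_db/views/send_email_view.py | build_surveillants_rows
-- ===== SOURCE A (Python) =====
-- def build_surveillants_rows(surveillants):
--     """Build HTML rows for surveillants table"""
--     html = ""
--
--     # Add surveillant rows
--     for surveillant in surveillants:
--         html += f"""
--       <tr>
--         <td style="text-align: left; padding-left: 10px;">{surveillant['nom']}</td>
--         <td style="border: 1px solid #000;">&nbsp;</td>
--         <td style="border: 1px solid #000;">&nbsp;</td>
--       </tr>"""
--
--     # Add empty rows (minimum 15 total)
--     for _ in range(max(0, 15 - len(surveillants))):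
--         html += """
--       <tr>
--         <td style="text-align: left; padding-left: 10px;">&nbsp;</td>
--         <td style="border: 1px solid #000;">&nbsp;</td>
--         <td style="border: 1px solid #000;">&nbsp;</td>
--       </tr>"""
--
--     return html
-- ===== SOURCE B (Python) =====
-- def build_surveillants_rows(surveillants):
--     """Build HTML rows for surveillants table"""
--     def row(cell):
--         return f"""
--       <tr>
--         <td style="text-align: left; padding-left: 10px;">{cell}</td>
--         <td style="border: 1px solid #000;">&nbsp;</td>
--         <td style="border: 1px solid #000;">&nbsp;</td>
--       </tr>"""
--
--     def rows(rest, remaining):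
--         if rest:
--             return row(rest[0]['nom']) + rows(rest[1:], remaining - 1)
--         if remaining > 0:
--             return row('&nbsp;') + rows(rest, remaining - 1)
--         return ""
--
--     return rows(list(surveillants), 15)
-- ===== Notes on version B (the rewrite author's own statement) =====
-- stated objective: alternative
-- what changed: B replaces A's two iterative accumulation loops by one recursive descent that threads a countdown of remaining rows: it consumes the surveillant list while decrementing the counter, then keeps emitting empty rows while the counter is positive, building the string by right-associated concatenation instead of a += accumulator.
import Mathlib
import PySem

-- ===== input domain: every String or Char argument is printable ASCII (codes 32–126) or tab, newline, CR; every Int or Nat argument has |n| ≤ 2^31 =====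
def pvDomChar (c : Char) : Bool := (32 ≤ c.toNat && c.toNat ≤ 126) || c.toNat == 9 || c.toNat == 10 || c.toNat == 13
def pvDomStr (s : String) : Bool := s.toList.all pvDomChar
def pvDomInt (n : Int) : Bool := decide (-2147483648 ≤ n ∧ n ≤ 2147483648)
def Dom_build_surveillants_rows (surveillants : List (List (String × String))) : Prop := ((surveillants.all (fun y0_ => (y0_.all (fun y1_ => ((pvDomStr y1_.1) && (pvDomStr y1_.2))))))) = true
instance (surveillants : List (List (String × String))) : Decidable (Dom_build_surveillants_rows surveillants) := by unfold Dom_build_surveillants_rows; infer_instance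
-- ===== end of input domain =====

-- B replaces A's two accumulation loops by one recursive descent threading a countdown of
-- remaining rows (consume names, then emit empty rows while the counter is positive); objective: alternative.
-- Python dict -> association list; surveillant['nom'] = first match (raises if absent, excluded by Pre_).

-- ===== PORT A =====
-- the f-string row with the surveillant's name in the first td
def pvRowNamed (nom : String) : String :=
  "\n      <tr>\n        <td style=\"text-align: left; padding-left: 10px;\">" ++ nom ++
  "</td>\n        <td style=\"border: 1px solid #000;\">&nbsp;</td>\n        <td style=\"border: 1px solid #000;\">&nbsp;</td>\n      </tr>"

-- the literal empty-row string of A's second loop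
def pvEmptyRow : String :=
  "\n      <tr>\n        <td style=\"text-align: left; padding-left: 10px;\">&nbsp;</td>\n        <td style=\"border: 1px solid #000;\">&nbsp;</td>\n        <td style=\"border: 1px solid #000;\">&nbsp;</td>\n      </tr>"

def build_surveillants_rows (surveillants : List (List (String × String))) : String :=
  let html := ""
  -- for surveillant in surveillants: html += f"""…{surveillant['nom']}…"""
  let html := surveillants.foldl (fun html surveillant => html ++ pvRowNamed ((surveillant.lookup "nom").getD "")) html
  -- for _ in range(max(0, 15 - len(surveillants))): html += """…"""
  let html := (PySem.List.pyRange 0 (max 0 (15 - (surveillants.length : Int))) 1).foldl (fun html _ => html ++ pvEmptyRow) html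
  html

-- ===== PORT B =====
-- def row(cell): the shared row template applied to one first-cell content
def pvRowOf (cell : String) : String :=
  "\n      <tr>\n        <td style=\"text-align: left; padding-left: 10px;\">" ++ cell ++
  "</td>\n        <td style=\"border: 1px solid #000;\">&nbsp;</td>\n        <td style=\"border: 1px solid #000;\">&nbsp;</td>\n      </tr>"

-- def rows(rest, remaining): recursive descent with the countdown counter
def pvRows : List (List (String × String)) → Int → String
  | s :: rest, remaining => pvRowOf ((s.lookup "nom").getD "") ++ pvRows rest (remaining - 1)
  | [], remaining =>
      if remaining > 0 then pvRowOf "&nbsp;" ++ pvRows [] (remaining - 1) else ""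
  termination_by rest remaining => (rest.length, remaining.toNat)
  decreasing_by
    · simp [Prod.lex_iff]
    · simp only [Prod.lex_iff]; exact Or.inr ⟨trivial, by omega⟩

def build_surveillants_rows_alt (surveillants : List (List (String × String))) : String :=
  pvRows surveillants 15

-- ===== PRECONDITION & SPEC =====
-- Pre_ excludes inputs where some surveillant dict has no 'nom' key: Python A raises KeyError there.
def Pre_build_surveillants_rows (surveillants : List (List (String × String))) : Prop :=
  ∀ s ∈ surveillants, (s.lookup "nom").isSome
instance (surveillants : List (List (String × String))) : Decidable (Pre_build_surveillants_rows surveillants) := by unfold Pre_build_surveillants_rows; infer_instance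

def pvWitness_build_surveillants_rows : (List (List (String × String))) := ([[("nom", "Alice")], [("nom", "Bob"), ("x", "y")]])

def Spec_build_surveillants_rows (surveillants : List (List (String × String))) (out : String) : Prop := out = build_surveillants_rows_alt surveillants
instance (surveillants : List (List (String × String))) (out : String) : Decidable (Spec_build_surveillants_rows surveillants out) := by unfold Spec_build_surveillants_rows; infer_instance

-- ===== CLAIM (what is proved, stated in full; the proofs are below) =====
def Claim_equal_build_surveillants_rows : Prop := ∀ (surveillants : List (List (String × String))), Dom_build_surveillants_rows surveillants → Pre_build_surveillants_rows surveillants → Spec_build_surveillants_rows surveillants (build_surveillants_rows surveillants)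

-- ===== LEMMAS AND PROOFS =====

theorem pv_join_eq (l : List String) (a : String) :
    l.foldl (· ++ ·) a = a ++ String.join l := by
  induction l generalizing a with
  | nil => simp [String.join, String.append_empty]
  | cons y ys ih =>
      rw [List.foldl_cons, ih (a ++ y)]
      conv_rhs => rw [String.join, List.foldl_cons,
        show ("" : String) ++ y = y from String.empty_append, ih y]
      rw [String.append_assoc]

theorem pv_join_cons (y : String) (ys : List String) :
    String.join (y :: ys) = y ++ String.join ys := by
  rw [String.join, List.foldl_cons, show ("" : String) ++ y = y from String.empty_append,
    pv_join_eq]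

-- accumulation with ++ equals prefix ++ join of the mapped list
theorem pv_foldl_append_join {α : Type} (f : α → String) (l : List α) (acc : String) :
    l.foldl (fun h x => h ++ f x) acc = acc ++ String.join (l.map f) := by
  induction l generalizing acc with
  | nil => simp [String.join, String.append_empty]
  | cons x xs ih =>
      simp only [List.foldl_cons, List.map_cons, ih, pv_join_cons, String.append_assoc]

-- the padding phase of pvRows produces exactly (max 0 r).toNat empty rows
theorem pv_rows_nil (r : Int) :
    pvRows [] r = String.join (List.replicate (max 0 r).toNat (pvRowOf "&nbsp;")) := by
  by_cases h : r > 0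
  · have hn : (max 0 r).toNat = (max 0 (r - 1)).toNat + 1 := by omega
    rw [pvRows, if_pos h, pv_rows_nil (r - 1), hn, List.replicate_succ, pv_join_cons]
  · have hn : (max 0 r).toNat = 0 := by omega
    rw [pvRows, if_neg h, hn]
    simp [String.join]
  termination_by r.toNat
  decreasing_by omega

-- pvRows = named rows ++ padding
theorem pv_rows_eq (l : List (List (String × String))) (r : Int) :
    pvRows l r = String.join (l.map (fun s => pvRowOf ((s.lookup "nom").getD ""))) ++
      String.join (List.replicate (max 0 (r - l.length)).toNat (pvRowOf "&nbsp;")) := by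
  induction l generalizing r with
  | nil => simp [String.join, pv_rows_nil, String.empty_append]
  | cons s rest ih =>
      rw [pvRows, ih (r - 1), List.map_cons, pv_join_cons, String.append_assoc]
      have : r - 1 - (rest.length : Int) = r - ((s :: rest).length : Int) := by
        simp; omega
      rw [this]

-- ===== VERDICT =====
set_option maxRecDepth 4000 in
theorem build_surveillants_rows_spec : Claim_equal_build_surveillants_rows := by
  intro surveillants _ _
  unfold Spec_build_surveillants_rows build_surveillants_rows build_surveillants_rows_alt
  dsimp only
  rw [pv_foldl_append_join, pv_foldl_append_join, List.map_const', PySem.List.length_pyRange_one,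
    pv_rows_eq]
  rw [show pvRowNamed = pvRowOf from rfl, show pvEmptyRow = pvRowOf "&nbsp;" from rfl]
  simp only [Int.sub_zero, show ∀ s : String, "" ++ s = s from fun _ => String.empty_append]
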